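-- pv_equiv track=rewrite | github.com/MaffooClock/advent-of-code | 2024/07/setup.py | left_to_right
-- ===== SOURCE A (Python) =====
-- ADD      = '+'
--
-- MULTIPLY = '*'
--
-- CONCAT   = '||'
--
-- def left_to_right( operands: list, operators: tuple ) -> tuple[ int, str ]:
--     result = operands[0]
--     expression = [ str( operands[0] ) ]
--
--     for value, operator in zip( operands[1:], operators ):
--         expression.extend( [ operator, str( value ) ] )
--
--         if operator == ADD:
--             result += value
--
--         elif operator == MULTIPLY:
--             result *= value
--
--         elif operator == CONCAT:
--             result = int( f"{result}{value}" )
--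
--     expression = ' '.join( expression )
--     return result, expression
-- ===== SOURCE B (Python) =====
-- ADD      = '+'
--
-- MULTIPLY = '*'
--
-- CONCAT   = '||'
--
-- _STEP = {
--     ADD:      lambda v: (lambda acc: acc + v),
--     MULTIPLY: lambda v: (lambda acc: acc * v),
--     CONCAT:   lambda v: (lambda acc: int(f"{acc}{v}")),
-- }
--
-- def _keep(acc):
--     return acc
--
-- def left_to_right(operands, operators):
--     pairs = list(zip(operators, operands[1:]))
--     n = len(pairs)
--
--     # pass 1: the expression, by interleaving via slice assignment
--     tokens = [''] * (2 * n + 1)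
--     tokens[0::2] = [str(x) for x in operands[:n + 1]]
--     tokens[1::2] = [op for op, _ in pairs]
--     expression = ' '.join(tokens)
--
--     # pass 2a: compile each step to a branch-free unary closure via a dispatch table
--     steps = [_STEP[op](v) if op in _STEP else _keep for op, v in pairs]
--
--     # pass 2b: run the compiled pipeline once over operands[0]
--     result = operands[0]
--     for step in steps:
--         result = step(result)
--
--     return result, expression
-- ===== Notes on version B (the rewrite author's own statement) =====
-- stated objective: alternative
-- what changed: B replaces A's single fused loop carrying (result, token-list) by staged passes: the expression is built by slice-assignment interleaving of the stringified operands with the operators, and the value is obtained by first compiling each (operator, value) pair into a branch-free unary closure via a dispatch table and then running that pipeline once over operands[0].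
import Mathlib
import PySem

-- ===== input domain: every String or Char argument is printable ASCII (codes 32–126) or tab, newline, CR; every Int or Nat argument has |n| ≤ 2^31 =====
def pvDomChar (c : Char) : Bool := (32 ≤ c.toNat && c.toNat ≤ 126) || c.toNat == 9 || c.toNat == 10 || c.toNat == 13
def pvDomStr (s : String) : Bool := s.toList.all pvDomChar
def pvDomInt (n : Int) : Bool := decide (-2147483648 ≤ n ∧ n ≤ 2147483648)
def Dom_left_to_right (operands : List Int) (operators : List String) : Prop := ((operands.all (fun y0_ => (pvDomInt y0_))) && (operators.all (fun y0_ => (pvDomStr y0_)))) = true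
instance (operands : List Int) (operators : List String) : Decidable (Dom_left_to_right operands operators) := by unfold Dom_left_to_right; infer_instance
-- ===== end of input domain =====

-- B re-decomposes A's single fused loop into two unrelated passes: slice-assignment
-- interleaving for the expression, and right-to-left closure composition (applied once
-- to operands[0]) for the value; return value only, same cost, no speed claim.

-- ===== PORT A =====
-- one fused loop over zip(operands[1:], operators) carrying (result, expression list).
-- int(f"{result}{value}") ported as ofChars? on the concatenated digit lists; the .getD 0
-- is unreachable inside Pre_ (ofChars? is none exactly when value < 0, excluded by Pre_).
def left_to_right (operands : List Int) (operators : List String) : Int × String :=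
  let result : Int := (PySem.List.pyGet? operands 0).getD 0
  let expression : List String := [PySem.Int.toStr ((PySem.List.pyGet? operands 0).getD 0)]
  let st := ((PySem.List.slice operands (some 1) none).zip operators).foldl
    (fun (st : Int × List String) (p : Int × String) =>
      let expression := st.2 ++ [p.2, PySem.Int.toStr p.1]
      let result :=
        if p.2 == "+" then st.1 + p.1
        else if p.2 == "*" then st.1 * p.1
        else if p.2 == "||" then
          (PySem.Int.ofChars? (PySem.Int.toChars st.1 ++ PySem.Int.toChars p.1)).getD 0
        else st.1
      (result, expression)) (result, expression)
  (st.1, PySem.Str.join " " st.2)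

-- ===== PORT B =====
-- tokens[0::2] / tokens[1::2] slice assignment = interleaving the two token lists
-- (exact here: the two lists always have lengths n+1 and n inside Pre_).
def ltrInterleave : List String → List String → List String
  | e :: es, o :: os => e :: o :: ltrInterleave es os
  | es, [] => es
  | [], _ :: os => os

-- B's _STEP dispatch table: compile one (operator, value) pair to a unary closure.
def ltrCompile (p : String × Int) : Int → Int :=
  if p.1 == "+" then fun acc => acc + p.2
  else if p.1 == "*" then fun acc => acc * p.2
  else if p.1 == "||" then
    fun acc => (PySem.Int.ofChars? (PySem.Int.toChars acc ++ PySem.Int.toChars p.2)).getD 0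
  else fun acc => acc

-- B: expression by interleaving; value by compiling the steps to a list of closures,
-- then running that pipeline once over operands[0].
def left_to_right_alt (operands : List Int) (operators : List String) : Int × String :=
  let pairs := operators.zip (PySem.List.slice operands (some 1) none)
  let n := pairs.length
  let expression := PySem.Str.join " "
    (ltrInterleave ((PySem.List.slice operands none (some ((n : Int) + 1))).map PySem.Int.toStr)
                   (pairs.map (fun p => p.1)))
  let steps := pairs.map ltrCompile
  let result := steps.foldl (fun acc f => f acc) ((PySem.List.pyGet? operands 0).getD 0)
  (result, expression)

-- ===== PRECONDITION & SPEC =====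
-- A raises IndexError on empty operands, and ValueError when a '||' step gets a negative
-- right operand (int("…-…")); exactly those inputs are excluded.
def Pre_left_to_right (operands : List Int) (operators : List String) : Prop :=
  operands ≠ [] ∧ ∀ p ∈ operands.tail.zip operators, p.2 = "||" → 0 ≤ p.1
instance (operands : List Int) (operators : List String) : Decidable (Pre_left_to_right operands operators) := by unfold Pre_left_to_right; infer_instance
def pvWitness_left_to_right : List Int × List String := ([1, 2, 3], ["+", "||"])

def Spec_left_to_right (operands : List Int) (operators : List String) (out : Int × String) : Prop := out = left_to_right_alt operands operators
instance (operands : List Int) (operators : List String) (out : Int × String) : Decidable (Spec_left_to_right operands operators out) := by unfold Spec_left_to_right; infer_instance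

-- ===== CLAIM (what is proved, stated in full; the proofs are below) =====
def Claim_equal_left_to_right : Prop := ∀ (operands : List Int) (operators : List String), Dom_left_to_right operands operators → Pre_left_to_right operands operators → Spec_left_to_right operands operators (left_to_right operands operators)

-- ===== LEMMAS AND PROOFS =====

-- the per-step value update both programs dispatch on
def ltrApply (acc : Int) (p : String × Int) : Int :=
  if p.1 == "+" then acc + p.2
  else if p.1 == "*" then acc * p.2
  else if p.1 == "||" then
    (PySem.Int.ofChars? (PySem.Int.toChars acc ++ PySem.Int.toChars p.2)).getD 0
  else acc

-- running B's compiled pipeline is the left fold of ltrApply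
theorem ltr_compose_eq (ps : List (String × Int)) (init : Int) :
    (ps.map ltrCompile).foldl (fun acc f => f acc) init = ps.foldl ltrApply init := by
  rw [List.foldl_map]
  refine PySem.List.foldl_congr_mem ps _ ltrApply init (fun acc p _ => ?_)
  simp only [ltrCompile, ltrApply]
  split_ifs <;> rfl

-- B's interleaved token list is A's flattened one
theorem ltr_interleave_eq (x0 : Int) (t : List Int) (ops : List String) :
    ltrInterleave
      (PySem.Int.toStr x0 :: ((t.take (ops.zip t).length).map PySem.Int.toStr))
      ((ops.zip t).map (fun p => p.1))
    = PySem.Int.toStr x0 :: (ops.zip t).flatMap (fun p => [p.1, PySem.Int.toStr p.2]) := by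
  induction t generalizing x0 ops with
  | nil => cases ops <;> simp [ltrInterleave]
  | cons v t ih =>
    cases ops with
    | nil => simp [ltrInterleave]
    | cons op ops =>
      simp only [List.zip_cons_cons, List.length_cons, List.take_succ_cons, List.map_cons,
        List.flatMap_cons, ltrInterleave]
      rw [ih v ops]
      rfl

-- A's fused fold = (the ltrApply fold over the swapped zip, initial list ++ flattened tokens)
theorem ltr_fold_split (t : List Int) (ops : List String) (r : Int) (e : List String) :
    (t.zip ops).foldl
      (fun (st : Int × List String) (p : Int × String) =>
        let expression := st.2 ++ [p.2, PySem.Int.toStr p.1]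
        let result :=
          if p.2 == "+" then st.1 + p.1
          else if p.2 == "*" then st.1 * p.1
          else if p.2 == "||" then
            (PySem.Int.ofChars? (PySem.Int.toChars st.1 ++ PySem.Int.toChars p.1)).getD 0
          else st.1
        (result, expression)) (r, e)
    = ((ops.zip t).foldl ltrApply r,
       e ++ (ops.zip t).flatMap (fun p => [p.1, PySem.Int.toStr p.2])) := by
  induction t generalizing ops r e with
  | nil => simp
  | cons v t ih =>
    cases ops with
    | nil => simp
    | cons op ops =>
      simp only [List.zip_cons_cons, List.foldl_cons, List.flatMap_cons]
      rw [ih]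
      simp [ltrApply, List.append_assoc]

theorem left_to_right_spec : Claim_equal_left_to_right := by
  intro operands operators _ hpre
  obtain ⟨hne, -⟩ := hpre
  show left_to_right operands operators = left_to_right_alt operands operators
  obtain ⟨x0, t, rfl⟩ : ∃ x0 t, operands = x0 :: t := by
    cases operands with
    | nil => exact absurd rfl hne
    | cons a b => exact ⟨a, b, rfl⟩
  have h0 : (PySem.List.pyGet? (x0 :: t) 0).getD 0 = x0 := by simp [pysem]
  simp only [left_to_right, left_to_right_alt, PySem.List.slice_from_one, List.tail_cons,
    ltr_fold_split, ltr_compose_eq, List.singleton_append, h0]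
  have hcast : ((( (operators.zip t).length : Nat) : Int) + 1)
      = (((operators.zip t).length + 1 : Nat) : Int) := by push_cast; ring
  rw [hcast, PySem.List.slice_to_natCast]
  simp only [List.take_succ_cons, List.map_cons, List.length_zip]
  congr 1
  rw [← List.length_zip, ltr_interleave_eq]

-- ===== VERDICT (by name: the statement is the Claim_ definition above) =====
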